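-- pv_equiv track=rewrite | github.com/majprar/ca_eau | eau11.py | indexwanted
-- ===== SOURCE A (Python) =====
-- def indexwanted(table):
--     table1 = table[0:-1]
--     for i in table:
--         if i != table[-1]:
--             break
--     else:
--         result = 0
--         return result
--     for i in range(0, len(table1)):
--         if table1[i] == table[-1]:
--             return i + 1
--     else:
--         return -1
-- ===== SOURCE B (Python) =====
-- def indexwanted(table):
--     if not table:
--         return 0
--     last = table[-1]
--     saw_different = False
--     first_hit = -1
--     for i, x in enumerate(table[:-1]):
--         if x != last:
--             saw_different = True
--         elif first_hit < 0:
--             first_hit = i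
--     if not saw_different:
--         return 0
--     return first_hit + 1 if first_hit >= 0 else -1
-- ===== Notes on version B (the rewrite author's own statement) =====
-- stated objective: alternative
-- what changed: B fuses A's two sequential scans (the all-equal check over table and the indexed search over table[:-1]) into a single enumerate pass that maintains saw_different and first_hit, deciding the result after the loop.
import Mathlib
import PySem

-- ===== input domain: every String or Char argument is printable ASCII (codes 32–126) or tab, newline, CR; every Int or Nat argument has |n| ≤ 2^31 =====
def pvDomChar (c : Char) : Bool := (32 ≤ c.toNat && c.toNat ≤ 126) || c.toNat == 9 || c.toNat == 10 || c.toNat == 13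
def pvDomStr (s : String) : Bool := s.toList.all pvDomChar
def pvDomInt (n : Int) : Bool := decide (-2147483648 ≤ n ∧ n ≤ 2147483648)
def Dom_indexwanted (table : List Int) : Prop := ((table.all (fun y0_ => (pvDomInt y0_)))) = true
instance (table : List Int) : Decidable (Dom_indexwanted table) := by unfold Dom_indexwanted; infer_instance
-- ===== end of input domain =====

-- B fuses A's two sequential scans into one pass over table[:-1] (alternative decomposition, same O(n) cost).


-- ===== PORT A =====
-- first loop: 'for i in table: if i != table[-1]: break' — returns true iff the break fired
def pvA_break (xs : List Int) (table : List Int) : Bool :=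
  match xs with
  | [] => false
  | i :: rest =>
      -- table[-1]: always in range when this branch is reached (table nonempty); getD never used
      if i ≠ (PySem.List.pyGet? table (-1)).getD 0 then true else pvA_break rest table

-- second loop: 'for i in range(0, len(table1)): if table1[i] == table[-1]: return i + 1' else -1
def pvA_scan (table1 : List Int) (last : Int) (i : Nat) : Int :=
  if h : i < table1.length then
    if table1[i] = last then (i : Int) + 1 else pvA_scan table1 last (i + 1)
  else -1
termination_by table1.length - i

def indexwanted (table : List Int) : Int :=
  let table1 := PySem.List.slice table (some 0) (some (-1))
  if pvA_break table table then
    pvA_scan table1 ((PySem.List.pyGet? table (-1)).getD 0) 0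
  else 0

-- ===== PORT B =====
-- the single fused pass of Source B: (saw_different, first_hit) over table[:-1]
def pvB_loop (xs : List Int) (last : Int) (i : Nat) (sawDifferent : Bool) (firstHit : Int) :
    Bool × Int :=
  match xs with
  | [] => (sawDifferent, firstHit)
  | x :: rest =>
      if x ≠ last then pvB_loop rest last (i + 1) true firstHit
      else if firstHit < 0 then pvB_loop rest last (i + 1) sawDifferent (i : Int)
      else pvB_loop rest last (i + 1) sawDifferent firstHit

def indexwanted_alt (table : List Int) : Int :=
  if table = [] then 0
  else
    let last := (PySem.List.pyGet? table (-1)).getD 0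
    let st := pvB_loop (PySem.List.slice table (some 0) (some (-1))) last 0 false (-1)
    if st.1 = false then 0
    else if st.2 ≥ 0 then st.2 + 1 else -1

-- ===== PRECONDITION & SPEC =====
def Spec_indexwanted (table : List Int) (out : Int) : Prop := out = indexwanted_alt table
instance (table : List Int) (out : Int) : Decidable (Spec_indexwanted table out) := by unfold Spec_indexwanted; infer_instance

-- ===== CLAIM (what is proved, stated in full; the proofs are below) =====
def Claim_equal_indexwanted : Prop := ∀ (table : List Int), Dom_indexwanted table → Spec_indexwanted table (indexwanted table)

-- ===== LEMMAS AND PROOFS =====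

-- A's first loop is 'any (· ≠ last)'
theorem pvA_break_eq_any (xs table : List Int) :
    pvA_break xs table = xs.any (fun x => x ≠ (PySem.List.pyGet? table (-1)).getD 0) := by
  induction xs with
  | nil => rfl
  | cons x rest ih =>
      simp only [pvA_break, List.any_cons, ih]
      by_cases h : x = (PySem.List.pyGet? table (-1)).getD 0 <;> simp [h]

-- A's indexed scan is findIdx? on the dropped suffix, offset by i
theorem pvA_scan_eq (t : List Int) (last : Int) (i : Nat) :
    pvA_scan t last i =
      match (t.drop i).findIdx? (fun x => x = last) with
      | some k => (i : Int) + (k : Int) + 1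
      | none => -1 := by
  by_cases h : i < t.length
  · have hd : t.drop i = t[i] :: t.drop (i + 1) := List.drop_eq_getElem_cons h
    rw [pvA_scan, dif_pos h, hd]
    by_cases he : t[i] = last
    · simp [List.findIdx?_cons, he]
    · have ih := pvA_scan_eq t last (i + 1)
      rw [if_neg he, ih]
      simp only [List.findIdx?_cons, he, decide_false]
      cases hk : (t.drop (i + 1)).findIdx? (fun x => x = last) with
      | none => simp [hk]
      | some k =>
          simp only [hk, if_neg (by simp : ¬ (false = true)), Option.map_some]
          push_cast; ring
  · rw [pvA_scan, dif_neg h]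
    rw [List.drop_eq_nil_of_le (by omega)]
    rfl
termination_by t.length - i

-- B's fused loop, characterised for an arbitrary accumulator state
theorem pvB_loop_eq (xs : List Int) (last : Int) (i : Nat) (sd : Bool) (fh : Int) :
    pvB_loop xs last i sd fh =
      ((sd || xs.any (fun x => x ≠ last)),
        if fh ≥ 0 then fh
        else match xs.findIdx? (fun x => x = last) with
          | some k => (i : Int) + (k : Int)
          | none => fh) := by
  induction xs generalizing i sd fh with
  | nil => simp [pvB_loop]
  | cons x rest ih =>
      rw [pvB_loop]
      by_cases he : x = last
      · rw [if_neg (by simp [he])]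
        by_cases hfh : fh < 0
        · rw [if_pos hfh, ih]
          have h1 : ¬ fh ≥ 0 := by omega
          simp [List.any_cons, he, List.findIdx?_cons, h1, Int.natCast_nonneg]
        · rw [if_neg hfh, ih]
          have h1 : fh ≥ 0 := by omega
          simp [List.any_cons, he, List.findIdx?_cons, h1]
      · rw [if_pos he, ih]
        simp only [List.any_cons, List.findIdx?_cons, he, decide_false,
          if_neg (by simp : ¬ (false = true)), decide_true, ne_eq, not_false_eq_true,
          Bool.true_or, Bool.or_true, Prod.mk.injEq, true_and]
        split_ifs with h1
        · rfl
        · cases hk : rest.findIdx? (fun x => x = last) with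
          | none => simp [hk]
          | some k => simp only [hk, Option.map_some]; push_cast; ring

theorem indexwanted_eq_alt : ∀ (table : List Int), indexwanted table = indexwanted_alt table := by
  intro table
  cases table with
  | nil => rfl
  | cons a rest =>
    have hne : (a :: rest) ≠ ([] : List Int) := by simp
    set t := a :: rest with ht
    have hlast : (PySem.List.pyGet? t (-1)).getD 0 = t.getLast hne := by
      rw [PySem.List.pyGet?_neg_one, List.getLast?_eq_some_getLast hne]; rfl
    set last := t.getLast hne with hl
    have hslice : PySem.List.slice t (some 0) (some (-1)) = t.dropLast := by
      rw [PySem.List.slice_zero_start, PySem.List.slice_to_neg_one]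
    have hsplit : t.dropLast ++ [last] = t := List.dropLast_concat_getLast hne
    have hany : t.any (fun x => x ≠ last) = t.dropLast.any (fun x => x ≠ last) := by
      conv_lhs => rw [← hsplit]
      simp [List.any_append]
    rw [indexwanted, indexwanted_alt, if_neg hne]
    simp only [hslice, hlast, pvA_break_eq_any, pvB_loop_eq, hany]
    by_cases ha : t.dropLast.any (fun x => x ≠ last) = true
    · rw [if_pos ha, pvA_scan_eq]
      simp only [ha, Bool.false_or]
      rw [if_neg (by simp)]
      simp only [List.drop_zero]
      rw [if_neg (by omega : ¬ ((-1 : Int) ≥ 0))]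
      cases hk : t.dropLast.findIdx? (fun x => x = last) with
      | none => simp
      | some k =>
          rw [if_pos (by positivity : ((0 : Nat) : Int) + (k : Int) ≥ 0)]
    · rw [if_neg ha]
      simp only [Bool.not_eq_true] at ha
      rw [Bool.false_or, ha, if_pos rfl]

-- ===== VERDICT (by name: the statement is the Claim_ definition above) =====
theorem indexwanted_spec : Claim_equal_indexwanted := by
  intro table _
  unfold Spec_indexwanted
  exact indexwanted_eq_alt table
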